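-- pv_equiv track=rewrite | github.com/MiniVee/AlgorithmSolving | For_Base_Algorithm/week3/study2.py | solution
-- ===== SOURCE A (Python) =====
-- def solution(card):
--
--     setCardElement = set()                              # set을 사용하여 중복을 없앤 집합을 만든다.
--     setCardElementDuplicate = set()
--
--     for cardElement in card:                            # 배열 card 원소마다 for 문을 돈다
--         if cardElement in setCardElementDuplicate:      # setCardElementDuplicate에 card의 원소가 있으면 continue
--             continue
--
--         checkExist = cardElement in setCardElement      # setCardElement에 기존 card 원소가 있는지 확인한다.
--         if checkExist == False:                         # setCardElement에 기존 card 원소가 없으면 setCardElement에 원소 추가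
--             setCardElement.add(cardElement)
--         else:                                           # setCardElement에 기존 card 원소가 있는 경우
--             setCardElementDuplicate.add(cardElement)    # setCardElementDuplicate에 card 원소추가
--             setCardElement.remove(cardElement)          # setCardElement에 card 원소 제거
--
--     lstCardElement = list(setCardElement)               # set함수는 집합이기에 list로 만든다.
--     lstCardElement.sort()                               # 정렬해주면 끝
--     return lstCardElement
-- ===== SOURCE B (Python) =====
-- def solution(card):
--     s = sorted(card)
--     res = []
--     n = len(s)
--     i = 0
--     while i < n:
--         j = i + 1
--         while j < n and s[j] == s[i]:
--             j += 1
--         if j == i + 1: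
--             res.append(s[i])
--         i = j
--     return res
-- ===== Notes on version B (the rewrite author's own statement) =====
-- stated objective: alternative
-- what changed: Sort first, then a single run-length scan over the sorted list collects values whose run has length 1; no sets, no frequency table, and the output needs no final sort.
import Mathlib
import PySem

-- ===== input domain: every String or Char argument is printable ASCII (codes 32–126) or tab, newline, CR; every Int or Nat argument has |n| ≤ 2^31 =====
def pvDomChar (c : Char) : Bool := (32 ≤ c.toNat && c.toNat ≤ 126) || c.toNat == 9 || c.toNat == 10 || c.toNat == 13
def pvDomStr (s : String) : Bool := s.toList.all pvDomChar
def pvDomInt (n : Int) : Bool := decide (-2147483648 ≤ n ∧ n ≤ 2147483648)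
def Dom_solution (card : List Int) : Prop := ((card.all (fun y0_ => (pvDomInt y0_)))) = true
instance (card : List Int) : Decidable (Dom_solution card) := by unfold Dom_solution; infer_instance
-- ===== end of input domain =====

-- B sorts first and then collects, in one scan over the sorted list, the values whose run of equal
-- neighbours has length 1 (no sets, no frequency table, no final sort of the result).


-- ===== PORT A =====
-- one iteration of A's for-loop over (setCardElement, setCardElementDuplicate)
def solutionStep (st : PySem.Set Int × PySem.Set Int) (cardElement : Int) :
    PySem.Set Int × PySem.Set Int :=
  if PySem.Set.contains st.2 cardElement then st        -- continue
  else
    let checkExist := PySem.Set.contains st.1 cardElement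
    if checkExist = false then (PySem.Set.add st.1 cardElement, st.2)
    else
      -- set.remove: the element was just checked present, so remove? is some; getD is exact here
      ((PySem.Set.remove? st.1 cardElement).getD st.1, PySem.Set.add st.2 cardElement)

def solution (card : List Int) : List Int :=
  PySem.List.sorted (card.foldl solutionStep (PySem.Set.empty, PySem.Set.empty)).1
    (fun x => x) false

-- ===== PORT B =====
-- the outer while loop of Source B: the suffix not yet scanned is (x :: xs); the inner while loop
-- advances j over the run of elements equal to s[i] = x (takeWhile/dropWhile on the suffix)
def solutionRunScan : List Int → List Int
  | [] => []
  | x :: xs =>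
    if xs.takeWhile (fun y => y == x) = [] then
      x :: solutionRunScan (xs.dropWhile (fun y => y == x))   -- j == i + 1: append s[i]
    else
      solutionRunScan (xs.dropWhile (fun y => y == x))
termination_by t => t.length
decreasing_by
  all_goals
    simp only [List.length_cons]
    exact Nat.lt_succ_of_le (List.length_dropWhile_le _ xs)

def solution_alt (card : List Int) : List Int :=
  solutionRunScan (PySem.List.sorted card (fun x => x) false)

-- ===== PRECONDITION & SPEC =====
def Spec_solution (card : List Int) (out : List Int) : Prop := out = solution_alt card
instance (card : List Int) (out : List Int) : Decidable (Spec_solution card out) := by unfold Spec_solution; infer_instance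

-- ===== CLAIM (what is proved, stated in full; the proofs are below) =====
def Claim_equal_solution : Prop := ∀ (card : List Int), Dom_solution card → Spec_solution card (solution card)

-- ===== LEMMAS AND PROOFS =====

-- invariant of A's loop: with p the already-processed prefix, the first set holds exactly
-- the values seen once so far (and stays duplicate-free), the second those seen at least twice
lemma solution_loop_inv (l : List Int) (p s dup : List Int)
    (hns : s.Nodup)
    (hs : ∀ x, x ∈ s ↔ p.count x = 1)
    (hd : ∀ x, x ∈ dup ↔ 2 ≤ p.count x) :
    (l.foldl solutionStep (s, dup)).1.Nodup ∧
      (∀ x, x ∈ (l.foldl solutionStep (s, dup)).1 ↔ (p ++ l).count x = 1) := by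
  induction l generalizing p s dup with
  | nil => simpa using ⟨hns, hs⟩
  | cons a l ih =>
    rw [List.foldl_cons]
    have hrest : ∀ s' dup', solutionStep (s, dup) a = (s', dup') → s'.Nodup →
        (∀ x, x ∈ s' ↔ (p ++ [a]).count x = 1) →
        (∀ x, x ∈ dup' ↔ 2 ≤ (p ++ [a]).count x) →
        (l.foldl solutionStep (solutionStep (s, dup) a)).1.Nodup ∧
          (∀ x, x ∈ (l.foldl solutionStep (solutionStep (s, dup) a)).1 ↔ (p ++ a :: l).count x = 1) := by
      intro s' dup' heq h1 h2 h3
      rw [heq]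
      have := ih (p ++ [a]) s' dup' h1 h2 h3
      simpa [List.append_assoc] using this
    by_cases hdup : a ∈ dup
    · have ha2 : 2 ≤ p.count a := (hd a).mp hdup
      refine hrest s dup (by simp [solutionStep, hdup]) hns ?_ ?_ <;> intro x <;>
        simp only [hs x, hd x, List.count_append, List.count_singleton] <;>
        split_ifs with hax
      · have h' := eq_of_beq hax; subst h'; omega
      · omega
      · have h' := eq_of_beq hax; subst h'; omega
      · omega
    · have hand : ¬ 2 ≤ p.count a := fun h => hdup ((hd a).mpr h)
      by_cases hmem : a ∈ s
      · have ha1 : p.count a = 1 := (hs a).mp hmem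
        have heq : solutionStep (s, dup) a =
            (s.filter (fun y => !(y == a)), PySem.Set.add dup a) := by
          simp [solutionStep, hdup, hmem, PySem.Set.remove?, PySem.Set.discard]
        refine hrest _ _ heq (hns.filter _) ?_ ?_ <;> intro x
        · simp only [List.mem_filter, hs x, List.count_append, List.count_singleton,
            Bool.not_eq_eq_eq_not, Bool.not_true, beq_eq_false_iff_ne]
          split_ifs with hax
          · have h' := eq_of_beq hax; subst h'; simp [ha1]
          · have hxa : x ≠ a := fun h => hax (by simp [h])
            simp [hxa]
        · simp only [PySem.Set.mem_add, hd x, List.count_append, List.count_singleton]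
          split_ifs with hax
          · have h' := eq_of_beq hax; subst h'; simp [ha1]
          · have hxa : ¬ x = a := fun h => hax (by simp [h])
            simp [hxa]
      · have ha0 : p.count a = 0 := by
          have h1 : ¬ p.count a = 1 := fun h => hmem ((hs a).mpr h)
          omega
        have heq : solutionStep (s, dup) a = (PySem.Set.add s a, dup) := by
          simp [solutionStep, hdup, hmem]
        refine hrest _ _ heq (PySem.Set.nodup_add s a hns) ?_ ?_ <;> intro x
        · simp only [PySem.Set.mem_add, hs x, List.count_append, List.count_singleton]
          split_ifs with hax
          · have h' := eq_of_beq hax; subst h'; simp [ha0]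
          · have hxa : ¬ x = a := fun h => hax (by simp [h])
            simp [hxa]
        · simp only [hd x, List.count_append, List.count_singleton]
          split_ifs with hax
          · have h' := eq_of_beq hax; subst h'; omega
          · omega

-- B's scan on a (≤)-sorted list: the result is strictly increasing and contains exactly the
-- values whose multiplicity in the list is 1
lemma runScan_spec : ∀ (n : Nat) (t : List Int), t.length ≤ n → t.Pairwise (· ≤ ·) →
    (solutionRunScan t).Pairwise (· < ·) ∧ (∀ x, x ∈ solutionRunScan t ↔ t.count x = 1) := by
  intro n
  induction n with
  | zero =>
    intro t hlen _
    have : t = [] := List.eq_nil_of_length_eq_zero (Nat.le_zero.mp hlen)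
    subst this
    simp [solutionRunScan]
  | succ n ih =>
    intro t hlen hsort
    match t with
    | [] => simp [solutionRunScan]
    | x :: xs =>
      have hx : ∀ y ∈ xs, x ≤ y := fun y hy => (List.pairwise_cons.mp hsort).1 y hy
      have hxs : xs.Pairwise (· ≤ ·) := (List.pairwise_cons.mp hsort).2
      set run := xs.takeWhile (fun y => y == x) with hrun
      set rest := xs.dropWhile (fun y => y == x) with hrest
      have hsplit : xs = run ++ rest := (List.takeWhile_append_dropWhile).symm
      have hrunx : ∀ y ∈ run, y = x := by
        intro y hy
        have := List.mem_takeWhile_imp hy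
        exact eq_of_beq this
      have hrestsort : rest.Pairwise (· ≤ ·) := hxs.sublist (List.dropWhile_sublist _)
      have hrestgt : ∀ y ∈ rest, x < y := by
        intro y hy
        cases hr : rest with
        | nil => rw [hr] at hy; simp at hy
        | cons h tl =>
          have hh : ¬ (h == x) = true := by
            have := List.head?_dropWhile_not (fun y => y == x) xs
            rw [← hrest, hr] at this
            simpa using this
          have hhx : x < h := by
            have hhm : h ∈ xs := by rw [hsplit, hr]; simp
            have := hx h hhm
            have hne : h ≠ x := by simpa using hh
            omega
          rw [hr] at hy
          rcases List.mem_cons.mp hy with rfl | hy'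
          · exact hhx
          · have := (List.pairwise_cons.mp (hr ▸ hrestsort)).1 y hy'
            omega
      have hrestlen : rest.length ≤ n := by
        have h1 := List.length_dropWhile_le (fun y => y == x) xs
        simp only [List.length_cons] at hlen
        rw [← hrest] at h1
        omega
      obtain ⟨hp, hm⟩ := ih rest hrestlen hrestsort
      -- counts in x :: xs via the split
      have hcount : ∀ y, (x :: xs).count y =
          (if y = x then 1 + run.length else 0) + rest.count y := by
        intro y
        rw [hsplit, List.count_cons, List.count_append]
        by_cases hyx : y = x
        · subst hyx
          have : run.count y = run.length := by
            rw [List.count_eq_length]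
            intro a ha
            exact ((hrunx a ha).symm ▸ rfl)
          simp [this]
          omega
        · have : run.count y = 0 := by
            rw [List.count_eq_zero]
            intro hmem
            exact hyx (hrunx y hmem)
          have hxy : ¬ x = y := fun h => hyx h.symm
          simp [this, hyx, hxy]
      have hxrest : rest.count x = 0 := by
        rw [List.count_eq_zero]
        intro hmem
        exact absurd (hrestgt x hmem) (lt_irrefl x)
      by_cases hempty : run = []
      · have hscan : solutionRunScan (x :: xs) = x :: solutionRunScan rest := by
          rw [solutionRunScan, ← hrun, ← hrest, if_pos hempty]
        rw [hscan]
        constructor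
        · rw [List.pairwise_cons]
          refine ⟨fun y hy => ?_, hp⟩
          have hc := (hm y).mp hy
          exact hrestgt y (List.count_pos_iff.mp (by omega))
        · intro y
          rw [List.mem_cons, hm y, hcount y]
          by_cases hyx : y = x
          · subst hyx; simp [hempty, hxrest]
          · simp [hyx]
      · have hscan : solutionRunScan (x :: xs) = solutionRunScan rest := by
          rw [solutionRunScan, ← hrun, ← hrest, if_neg hempty]
        rw [hscan]
        refine ⟨hp, fun y => ?_⟩
        rw [hm y, hcount y]
        by_cases hyx : y = x
        · subst hyx
          have : 1 ≤ run.length := List.length_pos_iff.mpr hempty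
          simp [hxrest]
          omega
        · simp [hyx]

theorem solution_spec : Claim_equal_solution := by
  intro card _
  unfold Spec_solution solution solution_alt
  set t := PySem.List.sorted card (fun x => x) false with ht
  have htsort : t.Pairwise (· ≤ ·) := by
    have := PySem.List.sorted_pairwise card (fun x => x) (κ := Int)
    simpa using this
  have htperm : t.Perm card := PySem.List.sorted_perm card (fun x => x) false
  obtain ⟨hp, hm⟩ := runScan_spec t.length t le_rfl htsort
  obtain ⟨hnod, hmem⟩ := solution_loop_inv card [] PySem.Set.empty PySem.Set.empty
    (by simp) (by simp) (by simp)
  apply PySem.List.sorted_eq_of_perm_of_pairwise_lt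
  · rw [List.perm_ext_iff_of_nodup (hp.imp ne_of_lt) hnod]
    intro x
    rw [hm x, hmem x, htperm.count_eq]
    simp
  · simpa using hp
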